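-- pv_equiv track=rewrite | github.com/disruptio-org/cne_docker | cne_docker/api/extractor/ai.py | guess_is_name
-- ===== SOURCE A (Python) =====
-- def guess_is_name(line: str, enable_ia: bool = True) -> bool:
--     if not enable_ia:
--         return True
--     if any(ch.isdigit() for ch in line):
--         return False
--     tokens = [t for t in line.split() if len(t) > 1]
--     ups = sum(1 for t in tokens if t[:1].isupper())
--     return len(tokens) >= 2 and ups >= 2
-- ===== SOURCE B (Python) =====
-- def guess_is_name(line: str, enable_ia: bool = True) -> bool:
--     if not enable_ia:
--         return True
--     tokens = 0
--     ups = 0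
--     wlen = 0
--     wup = False
--     for ch in line:
--         if ch.isdigit():
--             return False
--         if ch.isspace():
--             if wlen > 1:
--                 tokens += 1
--                 if wup:
--                     ups += 1
--             wlen = 0
--             wup = False
--         else:
--             if wlen == 0:
--                 wup = ch.isupper()
--             wlen += 1
--     if wlen > 1:
--         tokens += 1
--         if wup:
--             ups += 1
--     return tokens >= 2 and ups >= 2
-- ===== Notes on version B (the rewrite author's own statement) =====
-- stated objective: alternative
-- what changed: Replaces A's tokenisation-based pipeline (line.split(), filtered token list, per-token uppercase count) with a character-level state machine over the raw string that never materialises tokens: it tracks the current word length and whether its first character is uppercase, flushing counters at each whitespace boundary.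
import Mathlib
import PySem

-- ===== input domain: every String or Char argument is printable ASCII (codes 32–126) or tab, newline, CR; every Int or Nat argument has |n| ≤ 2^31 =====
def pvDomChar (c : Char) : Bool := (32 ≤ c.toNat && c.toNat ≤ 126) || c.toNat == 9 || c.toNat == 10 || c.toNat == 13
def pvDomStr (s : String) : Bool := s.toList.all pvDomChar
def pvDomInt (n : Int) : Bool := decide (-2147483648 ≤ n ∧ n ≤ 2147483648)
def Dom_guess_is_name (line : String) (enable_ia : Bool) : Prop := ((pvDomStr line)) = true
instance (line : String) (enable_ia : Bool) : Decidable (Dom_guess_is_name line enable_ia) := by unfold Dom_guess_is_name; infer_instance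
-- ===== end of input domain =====

-- B replaces A's split()-based token pipeline with a character-level state machine that never
-- builds the token list (alternative decomposition, same cost).

-- ===== PORT A =====
-- t[:1].isupper(): t[:1] is the first character (or ""); "".isupper() is False,
-- a one-ASCII-char string is upper iff the char is A–Z. Exact on the ASCII domain.
def pvFirstUpper (t : String) : Bool :=
  match t.toList with
  | [] => false
  | c :: _ => PySem.Chars.isupper c

def guess_is_name (line : String) (enable_ia : Bool) : Bool :=
  if !enable_ia then true
  else if line.toList.any PySem.Chars.isdigit then false
  else
    let tokens := (PySem.Str.split₀ line).filter (fun t => 1 < t.toList.length)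
    let ups := (tokens.filter (fun t => pvFirstUpper t)).length
    decide (2 ≤ tokens.length) && decide (2 ≤ ups)

-- ===== PORT B =====
-- Source B's for-loop over the characters: state = (tokens, ups, wlen = length of the current
-- word so far, wup = whether its first character was uppercase); flush at whitespace and at
-- the end of the string; early return False on a digit character.
def pvScanB : List Char → Nat → Nat → Nat → Bool → Bool
  | [], tokens, ups, wlen, wup =>
    if 1 < wlen then
      decide (2 ≤ tokens + 1) && decide (2 ≤ ups + (if wup then 1 else 0))
    else
      decide (2 ≤ tokens) && decide (2 ≤ ups)
  | c :: rest, tokens, ups, wlen, wup =>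
    if PySem.Chars.isdigit c then false
    else if PySem.Chars.isspace c then
      if 1 < wlen then pvScanB rest (tokens + 1) (ups + (if wup then 1 else 0)) 0 false
      else pvScanB rest tokens ups 0 false
    else
      if wlen = 0 then pvScanB rest tokens ups 1 (PySem.Chars.isupper c)
      else pvScanB rest tokens ups (wlen + 1) wup

def guess_is_name_alt (line : String) (enable_ia : Bool) : Bool :=
  if !enable_ia then true
  else pvScanB line.toList 0 0 0 false

-- ===== PRECONDITION & SPEC =====
def Spec_guess_is_name (line : String) (enable_ia : Bool) (out : Bool) : Prop := out = guess_is_name_alt line enable_ia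
instance (line : String) (enable_ia : Bool) (out : Bool) : Decidable (Spec_guess_is_name line enable_ia out) := by unfold Spec_guess_is_name; infer_instance

-- ===== CLAIM (what is proved, stated in full; the proofs are below) =====
def Claim_equal_guess_is_name : Prop := ∀ (line : String) (enable_ia : Bool), Dom_guess_is_name line enable_ia → Spec_guess_is_name line enable_ia (guess_is_name line enable_ia)

-- ===== LEMMAS AND PROOFS =====

-- first character (List Char form of pvFirstUpper)
def pvFUc (t : List Char) : Bool :=
  match t with
  | [] => false
  | c :: _ => PySem.Chars.isupper c

-- A's two counts, phrased over List Char tokens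
def pvCnt (ts : List (List Char)) : Nat := (ts.filter (fun t => 1 < t.length)).length
def pvCup (ts : List (List Char)) : Nat :=
  ((ts.filter (fun t => 1 < t.length)).filter (fun t => pvFUc t)).length

lemma pvFUc_nil : pvFUc [] = false := rfl

-- B's scan returns false as soon as a digit appears in the remaining input
lemma pvScanB_digit (s : List Char) (tokens ups wlen : Nat) (wup : Bool)
    (h : s.any PySem.Chars.isdigit = true) :
    pvScanB s tokens ups wlen wup = false := by
  induction s generalizing tokens ups wlen wup with
  | nil => simp at h
  | cons c rest ih =>
    simp only [List.any_cons, Bool.or_eq_true] at h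
    by_cases hd : PySem.Chars.isdigit c
    · simp [pvScanB, hd]
    · rcases h with h | h
      · exact absurd h hd
      · by_cases hs : PySem.Chars.isspace c
        · by_cases hl : 1 < wlen <;> simp [pvScanB, hd, hs, hl, ih _ _ _ _ h]
        · by_cases hl : wlen = 0 <;> simp [pvScanB, hd, hs, hl, ih _ _ _ _ h]

-- split₀.go's accumulator only prepends the already-finished words
lemma split₀_go_acc (s cur : List Char) (acc : List (List Char)) :
    PySem.Chars.split₀.go s cur acc = acc.reverse ++ PySem.Chars.split₀.go s cur [] := by
  induction s generalizing cur acc with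
  | nil =>
    by_cases h : cur.isEmpty <;> simp [PySem.Chars.split₀.go, h]
  | cons c rest ih =>
    by_cases hs : PySem.Chars.isspace c
    · by_cases h : cur.isEmpty
      · have l : ∀ a, PySem.Chars.split₀.go (c :: rest) cur a = PySem.Chars.split₀.go rest [] a :=
          fun a => by rw [PySem.Chars.split₀.go, if_pos hs, if_pos h]
        rw [l, l]; exact ih [] acc
      · rw [PySem.Chars.split₀.go, if_pos hs, if_neg h, ih,
          PySem.Chars.split₀.go, if_pos hs, if_neg h, ih [] [cur.reverse]]
        simp
    · have l : ∀ a, PySem.Chars.split₀.go (c :: rest) cur a = PySem.Chars.split₀.go rest (c :: cur) a :=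
        fun a => by rw [PySem.Chars.split₀.go, if_neg hs]
      rw [l, l]; exact ih (c :: cur) acc

-- appending a character to a nonempty word keeps its first character
lemma pvFUc_append (t : List Char) (c : Char) (h : t ≠ []) :
    pvFUc (t ++ [c]) = pvFUc t := by
  cases t with
  | nil => exact absurd rfl h
  | cons a r => simp [pvFUc]

-- the scan invariant: with no digit remaining, B's state machine computes A's counts,
-- shifted by the accumulators; cur is the reversed current word (as in split₀.go)
lemma pvScanB_clean (s cur : List Char) (tokens ups : Nat)
    (hnd : s.any PySem.Chars.isdigit = false) :
    pvScanB s tokens ups cur.length (pvFUc cur.reverse) =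
      (decide (2 ≤ tokens + pvCnt (PySem.Chars.split₀.go s cur [])) &&
       decide (2 ≤ ups + pvCup (PySem.Chars.split₀.go s cur []))) := by
  induction s generalizing cur tokens ups with
  | nil =>
    by_cases h : cur.isEmpty
    · have : cur = [] := List.isEmpty_iff.mp h
      subst this
      simp [pvScanB, PySem.Chars.split₀.go, pvCnt, pvCup]
    · rw [PySem.Chars.split₀.go, if_neg h]
      by_cases hl : 1 < cur.length
      · have hl' : 1 < cur.reverse.length := by simpa using hl
        simp only [pvScanB, if_pos hl, pvCnt, pvCup, List.reverse_cons, List.reverse_nil,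
          List.nil_append, List.filter_cons, hl', decide_true, if_true, List.filter_nil]
        by_cases hu : pvFUc cur.reverse
        · simp only [hu, decide_true, if_true, List.filter_cons, List.filter_nil,
            List.length_cons, List.length_nil]
          constructor
        · simp only [hu, Bool.false_eq_true, if_false, List.length_cons, List.length_nil]
          constructor
      · have hl' : ¬ 1 < cur.reverse.length := by simpa using hl
        simp [pvScanB, hl, pvCnt, pvCup]
  | cons c rest ih =>
    simp only [List.any_cons, Bool.or_eq_false_iff] at hnd
    obtain ⟨hd, hrest⟩ := hnd
    rw [PySem.Chars.split₀.go]
    simp only [pvScanB, hd, Bool.false_eq_true, if_false]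
    by_cases hs : PySem.Chars.isspace c
    · rw [if_pos hs, if_pos hs]
      by_cases h : cur.isEmpty
      · have : cur = [] := List.isEmpty_iff.mp h
        subst this
        simpa using ih [] tokens ups hrest
      · have hne : cur ≠ [] := fun hc => h (by simp [hc])
        rw [if_neg h, split₀_go_acc rest [] [cur.reverse]]
        by_cases hl : 1 < cur.length
        · have hl' : 1 < cur.reverse.length := by simpa using hl
          rw [if_pos hl]
          have := ih [] (tokens + 1) (ups + (if pvFUc cur.reverse then 1 else 0)) hrest
          simp only [List.length_nil, List.reverse_nil, pvFUc_nil] at this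
          rw [this]
          simp only [pvCnt, pvCup, List.reverse_cons, List.reverse_nil, List.nil_append,
            List.cons_append, List.nil_append, List.filter_cons, hl', decide_true, if_true]
          by_cases hu : pvFUc cur.reverse
          · simp only [hu, if_true, List.length_cons]
            congr 1 <;> · rw [decide_eq_decide]; omega
          · simp only [hu, Bool.false_eq_true, if_false, List.length_cons]
            congr 1 <;> · rw [decide_eq_decide]; omega
        · have hl' : ¬ 1 < cur.reverse.length := by simpa using hl
          rw [if_neg hl]
          have := ih [] tokens ups hrest
          simp only [List.length_nil, List.reverse_nil, pvFUc_nil] at this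
          rw [this]
          simp only [pvCnt, pvCup, List.reverse_cons, List.reverse_nil, List.nil_append,
            List.singleton_append, List.filter_cons, decide_eq_false hl', Bool.false_eq_true,
            if_false]
          rfl
    · rw [if_neg hs, if_neg hs]
      by_cases h0 : cur.length = 0
      · have : cur = [] := List.length_eq_zero_iff.mp h0
        subst this
        rw [show ([] : List Char).length = 0 from rfl, if_pos rfl]
        have := ih [c] tokens ups hrest
        simpa [pvFUc] using this
      · rw [if_neg h0]
        have hne : cur ≠ [] := fun hc => h0 (by simp [hc])
        have := ih (c :: cur) tokens ups hrest
        simp only [List.length_cons, List.reverse_cons] at this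
        rw [pvFUc_append cur.reverse c (by simpa using hne)] at this
        exact this

-- ===== VERDICT (by name: the statement is the Claim_ definition above) =====
theorem guess_is_name_spec : Claim_equal_guess_is_name := by
  intro line enable_ia _
  unfold Spec_guess_is_name guess_is_name guess_is_name_alt
  by_cases he : enable_ia
  · simp only [he, Bool.not_true, Bool.false_eq_true, if_false]
    by_cases hd : line.toList.any PySem.Chars.isdigit
    · rw [if_pos hd]
      exact (pvScanB_digit _ 0 0 0 false hd).symm
    · rw [if_neg hd]
      have h := pvScanB_clean line.toList [] 0 0 (eq_false_of_ne_true hd)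
      simp only [List.length_nil, List.reverse_nil, pvFUc_nil] at h
      rw [h]
      simp only [PySem.Str.split₀, PySem.Chars.split₀, List.filter_map, List.length_map,
        Function.comp_def, String.toList_ofList, pvCnt, pvCup, pvFirstUpper, pvFUc,
        Nat.zero_add]
  · simp [he]
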